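-- pv_equiv track=rewrite | github.com/AlexGuruz/Repos | Project-Kylo/scaffold/tools/snapshot.py | infer_columns_from_headers
-- ===== SOURCE A (Python) =====
-- from typing import Dict, List, Tuple
--
-- def column_index_to_letter(index_zero_based: int) -> str:
--     index = index_zero_based
--     letters = []
--     while index >= 0:
--         index, remainder = divmod(index, 26)
--         letters.append(chr(ord('A') + remainder))
--         index -= 1
--     return ''.join(reversed(letters))
--
-- def infer_columns_from_headers(headers: List[str]) -> Dict[str, str]:
--     mapping: Dict[str, str] = {}
--     if not headers:
--         return mapping
--
--     # Heuristics (case-insensitive exact token match)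
--     normalized = [h.strip().lower() if isinstance(h, str) else "" for h in headers]
--     wanted: List[Tuple[str, List[str]]] = [
--         ("Date", ["date"]),
--         ("Amount", ["amount", "$", "total"]),
--     ]
--     for label, keys in wanted:
--         for i, h in enumerate(normalized):
--             if h in keys:
--                 mapping[label] = column_index_to_letter(i)
--                 break
--     return mapping
-- ===== SOURCE B (Python) =====
-- from typing import Dict, List
--
--
-- def column_index_to_letter(index_zero_based: int) -> str:
--     # bijective base-26, built front-to-back by prepending
--     s = ""
--     n = index_zero_based + 1
--     while n > 0:
--         n, r = divmod(n - 1, 26)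
--         s = chr(ord('A') + r) + s
--     return s
--
--
-- def infer_columns_from_headers(headers: List[str]) -> Dict[str, str]:
--     mapping: Dict[str, str] = {}
--     if not headers:
--         return mapping
--     date_i = None
--     amount_i = None
--     for i, h in enumerate(headers):
--         key = h.strip().lower() if isinstance(h, str) else ""
--         if key == "date" and date_i is None:
--             date_i = i
--         elif key in ("amount", "$", "total") and amount_i is None:
--             amount_i = i
--     if date_i is not None:
--         mapping["Date"] = column_index_to_letter(date_i)
--     if amount_i is not None:
--         mapping["Amount"] = column_index_to_letter(amount_i)
--     return mapping
-- ===== Notes on version B (the rewrite author's own statement) =====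
-- stated objective: alternative
-- what changed: Instead of rescanning the normalized header list once per wanted label, B makes a single forward pass recording the first index whose key is 'date' and the first whose key is an amount alias, then assembles the mapping at the end (and builds the column letters by prepending instead of append+reverse).
import Mathlib
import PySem

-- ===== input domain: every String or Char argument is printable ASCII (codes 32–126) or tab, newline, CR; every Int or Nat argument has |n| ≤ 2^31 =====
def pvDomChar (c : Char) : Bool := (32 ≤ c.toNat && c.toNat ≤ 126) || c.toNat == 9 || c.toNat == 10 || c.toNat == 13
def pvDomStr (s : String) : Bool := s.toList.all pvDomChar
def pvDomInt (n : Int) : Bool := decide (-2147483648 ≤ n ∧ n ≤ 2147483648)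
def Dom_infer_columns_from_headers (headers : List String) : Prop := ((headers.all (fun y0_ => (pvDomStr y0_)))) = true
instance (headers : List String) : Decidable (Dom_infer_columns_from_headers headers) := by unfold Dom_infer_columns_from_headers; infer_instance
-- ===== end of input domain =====

-- B replaces A's per-label rescans of the header list by a single forward pass that
-- records the first "date" and first amount-key index, assembling the mapping at the end
-- (objective: alternative decomposition, same cost on these small inputs).

-- ===== PORT A =====
-- while index >= 0: index, r = divmod(index, 26); letters.append(chr(ord('A')+r)); index -= 1
def cilLoopA (index : Int) (letters : List Char) : List Char :=
  if h : 0 ≤ index then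
    cilLoopA (PySem.Int.floordiv index 26 - 1)
      (letters ++ [Char.ofNat ('A'.toNat + (PySem.Int.mod index 26).toNat)])
  else letters
termination_by (index + 1).toNat
decreasing_by
  rw [PySem.Int.floordiv_eq_ediv_of_pos (by omega : (0:Int) < 26)]
  have h1 : index / 26 ≤ index := Int.ediv_le_self 26 h
  have h2 : 0 ≤ index / 26 := Int.ediv_nonneg h (by omega)
  omega

def column_index_to_letter (index_zero_based : Int) : String :=
  String.ofList (cilLoopA index_zero_based []).reverse

-- inner 'for i, h in enumerate(normalized): if h in keys: … break'
def scanA (keys : List String) : List (Int × String) → Option Int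
  | [] => none
  | p :: rest => if p.2 ∈ keys then some p.1 else scanA keys rest

def infer_columns_from_headers (headers : List String) : List (String × String) :=
  if headers = [] then []
  else
    let normalized := headers.map (fun h => PySem.Str.lower (PySem.Str.strip h))
    let wanted : List (String × List String) := [("Date", ["date"]), ("Amount", ["amount", "$", "total"])]
    (wanted.foldl (fun (mapping : PySem.Dict String String) lk =>
        match scanA lk.2 (PySem.List.enumerate normalized) with
        | some i => mapping.insert lk.1 (column_index_to_letter i)
        | none => mapping) PySem.Dict.empty).items

-- ===== PORT B =====
-- while n > 0: n, r = divmod(n - 1, 26); s = chr(ord('A')+r) + s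
def cilLoopB (n : Int) (s : List Char) : List Char :=
  if h : 0 < n then
    cilLoopB (PySem.Int.floordiv (n - 1) 26)
      (Char.ofNat ('A'.toNat + (PySem.Int.mod (n - 1) 26).toNat) :: s)
  else s
termination_by n.toNat
decreasing_by
  rw [PySem.Int.floordiv_eq_ediv_of_pos (by omega : (0:Int) < 26)]
  have h1 : (n - 1) / 26 ≤ n - 1 := Int.ediv_le_self 26 (by omega)
  have h2 : 0 ≤ (n - 1) / 26 := Int.ediv_nonneg (by omega) (by omega)
  omega

def column_index_to_letter_alt (index_zero_based : Int) : String :=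
  String.ofList (cilLoopB (index_zero_based + 1) [])

-- loop body: remember the first "date" and first amount-key index
def stepB (st : Option Int × Option Int) (p : Int × String) : Option Int × Option Int :=
  let key := PySem.Str.lower (PySem.Str.strip p.2)
  if key = "date" ∧ st.1 = none then (some p.1, st.2)
  else if (key = "amount" ∨ key = "$" ∨ key = "total") ∧ st.2 = none then (st.1, some p.1)
  else st

def infer_columns_from_headers_alt (headers : List String) : List (String × String) :=
  if headers = [] then []
  else
    let st := (PySem.List.enumerate headers).foldl stepB (none, none)
    let m1 : PySem.Dict String String :=
      match st.1 with
      | some d => PySem.Dict.empty.insert "Date" (column_index_to_letter_alt d)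
      | none => PySem.Dict.empty
    let m2 : PySem.Dict String String :=
      match st.2 with
      | some a => m1.insert "Amount" (column_index_to_letter_alt a)
      | none => m1
    m2.items

-- ===== PRECONDITION & SPEC =====
def Spec_infer_columns_from_headers (headers : List String) (out : List (String × String)) : Prop := out = infer_columns_from_headers_alt headers
instance (headers : List String) (out : List (String × String)) : Decidable (Spec_infer_columns_from_headers headers out) := by unfold Spec_infer_columns_from_headers; infer_instance

-- ===== CLAIM (what is proved, stated in full; the proofs are below) =====
def Claim_equal_infer_columns_from_headers : Prop := ∀ (headers : List String), Dom_infer_columns_from_headers headers → Spec_infer_columns_from_headers headers (infer_columns_from_headers headers)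

-- ===== LEMMAS AND PROOFS =====

-- the two digit loops build the same letters, A appending then reversing, B prepending
theorem cil_loops (n : Nat) : ∀ (index : Int), (index + 1).toNat ≤ n → ∀ (letters s : List Char),
    (cilLoopA index letters).reverse ++ s = cilLoopB (index + 1) (letters.reverse ++ s) := by
  induction n with
  | zero =>
    intro index h letters s
    rw [cilLoopA, cilLoopB, dif_neg (by omega), dif_neg (by omega)]
  | succ n ih =>
    intro index h letters s
    by_cases h0 : 0 ≤ index
    · rw [cilLoopA, dif_pos h0, cilLoopB, dif_pos (by omega)]
      have hq : PySem.Int.floordiv index 26 = index / 26 :=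
        PySem.Int.floordiv_eq_ediv_of_pos (by omega)
      have hb : ((PySem.Int.floordiv index 26 - 1) + 1).toNat ≤ n := by
        have h1 : index / 26 ≤ index := Int.ediv_le_self 26 h0
        have h2 : 0 ≤ index / 26 := Int.ediv_nonneg h0 (by omega)
        omega
      have IH := ih (PySem.Int.floordiv index 26 - 1) hb
        (letters ++ [Char.ofNat ('A'.toNat + (PySem.Int.mod index 26).toNat)]) s
      simp only [sub_add_cancel, List.reverse_append, List.reverse_cons, List.reverse_nil,
        List.nil_append, List.cons_append, add_sub_cancel_right] at IH ⊢
      exact IH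
    · rw [cilLoopA, dif_neg h0, cilLoopB, dif_neg (by omega)]

theorem cil_eq (i : Int) : column_index_to_letter i = column_index_to_letter_alt i := by
  unfold column_index_to_letter column_index_to_letter_alt
  exact congrArg String.ofList (by simpa using cil_loops (i + 1).toNat i le_rfl [] [])

theorem enumerate_map (f : String → String) (l : List String) :
    ∀ (s : Int), PySem.List.enumerate (l.map f) s =
      (PySem.List.enumerate l s).map (fun p => (p.1, f p.2)) := by
  induction l with
  | nil => intro s; simp [PySem.List.enumerate_nil]
  | cons x xs ih => intro s; simp [PySem.List.enumerate_cons, ih]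

def gnorm (p : Int × String) : Int × String := (p.1, PySem.Str.lower (PySem.Str.strip p.2))

theorem foldB_spec : ∀ (l : List (Int × String)) (st : Option Int × Option Int),
    l.foldl stepB st =
      ((if st.1.isSome then st.1 else scanA ["date"] (l.map gnorm)),
       (if st.2.isSome then st.2 else scanA ["amount", "$", "total"] (l.map gnorm))) := by
  intro l
  induction l with
  | nil =>
    rintro ⟨a, b⟩
    cases a <;> cases b <;> simp [scanA]
  | cons p rest ih =>
    intro st
    simp only [List.foldl_cons, List.map_cons, ih]
    set k := PySem.Str.lower (PySem.Str.strip p.2) with hk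
    by_cases hd : k = "date"
    · cases h1 : st.1 <;>
        simp_all [stepB, scanA, gnorm, ← hk]
    · by_cases ha : k = "amount" ∨ k = "$" ∨ k = "total"
      · cases h2 : st.2 <;> cases h1 : st.1 <;>
          simp_all [stepB, scanA, gnorm, ← hk]
      · simp_all [stepB, scanA, gnorm, ← hk]

-- ===== VERDICT (by name: the statement is the Claim_ definition above) =====
theorem infer_columns_from_headers_spec : Claim_equal_infer_columns_from_headers := by
  intro headers _
  unfold Spec_infer_columns_from_headers infer_columns_from_headers infer_columns_from_headers_alt
  by_cases hE : headers = []
  · simp [hE]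
  · simp only [if_neg hE]
    have hmap : PySem.List.enumerate (headers.map (fun h => PySem.Str.lower (PySem.Str.strip h))) 0 =
        (PySem.List.enumerate headers 0).map gnorm := by
      simpa [gnorm] using enumerate_map (fun h => PySem.Str.lower (PySem.Str.strip h)) headers 0
    rw [foldB_spec]
    simp only [Option.isSome_none, Bool.false_eq_true, if_false, List.foldl_cons, List.foldl_nil,
      ← hmap, cil_eq]
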